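-- pv_equiv track=rewrite | github.com/llCUriel/-2013-2015---Projects | Bowyer–Watson Algorithm/App.py | obtainXListAndYList
-- ===== SOURCE A (Python) =====
-- def obtainXListAndYList(Figures):
--     cnt = 0
--     pointsX = []
--     pointsY = []
--     for figure in Figures:
--         for value in figure:
--             if cnt % 2 == 0:
--                 pointsX.append(value)
--             else:
--                 pointsY.append(value)
--             cnt+=1
--     return pointsX, pointsY
-- ===== SOURCE B (Python) =====
-- def obtainXListAndYList(Figures):
--     flat = [value for figure in Figures for value in figure]
--     return flat[::2], flat[1::2]
-- ===== Notes on version B (the rewrite author's own statement) =====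
-- stated objective: simpler
-- what changed: Replaces the running counter and per-element parity branch with a flatten-then-stride-slice decomposition: build the flat list once, then take flat[::2] and flat[1::2].
import Mathlib
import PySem

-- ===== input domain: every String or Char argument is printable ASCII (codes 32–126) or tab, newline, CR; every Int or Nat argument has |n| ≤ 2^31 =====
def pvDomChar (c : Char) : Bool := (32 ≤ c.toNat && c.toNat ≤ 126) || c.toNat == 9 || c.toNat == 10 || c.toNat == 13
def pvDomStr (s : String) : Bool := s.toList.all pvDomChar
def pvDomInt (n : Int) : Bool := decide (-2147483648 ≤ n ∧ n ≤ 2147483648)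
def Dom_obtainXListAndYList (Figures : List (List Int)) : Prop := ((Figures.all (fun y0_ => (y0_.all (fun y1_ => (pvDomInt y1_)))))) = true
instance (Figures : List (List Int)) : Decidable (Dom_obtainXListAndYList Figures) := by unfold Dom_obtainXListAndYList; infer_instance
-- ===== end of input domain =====

-- B replaces A's running counter and per-element parity branch by flattening once
-- and taking the two stride-2 slices flat[::2] and flat[1::2] (objective: simpler).

-- ===== PORT A =====
-- the body of A's inner loop: dispatch value on the parity of cnt
def pvStepA (st : Int × List Int × List Int) (value : Int) : Int × List Int × List Int :=
  match st with
  | (cnt, pointsX, pointsY) =>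
    if cnt % 2 == 0 then (cnt + 1, pointsX ++ [value], pointsY)
    else (cnt + 1, pointsX, pointsY ++ [value])

def obtainXListAndYList (Figures : List (List Int)) : List Int × List Int :=
  let s := Figures.foldl (fun st figure => figure.foldl pvStepA st) ((0 : Int), ([] : List Int), ([] : List Int))
  (s.2.1, s.2.2)

-- ===== PORT B =====
def obtainXListAndYList_alt (Figures : List (List Int)) : List Int × List Int :=
  let flat := Figures.flatMap (fun figure => figure)
  ((PySem.List.slice? flat none none 2).getD [], (PySem.List.slice? flat (some 1) none 2).getD [])

-- ===== PRECONDITION & SPEC =====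
def Spec_obtainXListAndYList (Figures : List (List Int)) (out : List Int × List Int) : Prop := out = obtainXListAndYList_alt Figures
instance (Figures : List (List Int)) (out : List Int × List Int) : Decidable (Spec_obtainXListAndYList Figures out) := by unfold Spec_obtainXListAndYList; infer_instance

-- ===== CLAIM (what is proved, stated in full; the proofs are below) =====
def Claim_equal_obtainXListAndYList : Prop := ∀ (Figures : List (List Int)), Dom_obtainXListAndYList Figures → Spec_obtainXListAndYList Figures (obtainXListAndYList Figures)

-- ===== LEMMAS AND PROOFS =====

-- every other element of a list, starting with the first (= l[::2])
def pvEvens : List Int → List Int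
  | [] => []
  | [x] => [x]
  | x :: _ :: t => x :: pvEvens t

theorem pvEvens_cons (y : Int) (t : List Int) : pvEvens (y :: t) = y :: pvEvens t.tail := by
  cases t <;> simp [pvEvens]

theorem pvEvens_getElem? (l : List Int) (k : Nat) : (pvEvens l)[k]? = l[2 * k]? := by
  induction l using pvEvens.induct generalizing k with
  | case1 => simp [pvEvens]
  | case2 x =>
    cases k with
    | zero => simp [pvEvens]
    | succ k => simp [pvEvens]
  | case3 x y t ih =>
    cases k with
    | zero => simp [pvEvens]
    | succ k =>
      have h2 : 2 * (k + 1) = (2 * k) + 1 + 1 := by omega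
      simp [pvEvens, ih, h2]

theorem pv_fm (xs : List Int) (f : Nat → Nat) (c : Nat) (h : ∀ j < c, f j < xs.length) :
    List.filterMap (fun j => xs[f j]?) (List.range c) = (List.range c).map (fun j => xs.getD (f j) 0) := by
  induction c with
  | zero => simp
  | succ c ih =>
    rw [List.range_succ, List.filterMap_append, List.map_append, ih (fun j hj => h j (by omega))]
    simp [List.getElem?_eq_getElem (h c (by omega))]

theorem pv_slice_two (xs : List Int) :
    PySem.List.slice? xs none none 2 = some (pvEvens xs) := by
  simp only [PySem.List.slice?, PySem.List.sliceIndices]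
  norm_num
  rw [List.filterMap_congr (g := fun j => xs[2 * j]?) (by intro j _; show xs[((2 : Int) * (j : Int)).toNat]? = xs[2 * j]?; congr 1)]
  rw [pv_fm xs (fun j => 2 * j) _ (by intro j hj; show 2 * j < xs.length; split at hj <;> omega)]
  apply List.ext_getElem?
  intro k
  rw [pvEvens_getElem?]
  by_cases hk : k < if 0 < xs.length then (((xs.length : Int) + 2 - 1) / 2).toNat else 0
  · have hlt : 2 * k < xs.length := by split at hk <;> omega
    rw [List.getElem?_map, List.getElem?_range hk]
    simp [List.getElem?_eq_getElem hlt]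
  · rw [List.getElem?_eq_none (by simpa using hk), List.getElem?_eq_none (by split at hk <;> omega)]

theorem pv_slice_two_one (xs : List Int) :
    PySem.List.slice? xs (some 1) none 2 = some (pvEvens xs.tail) := by
  rcases xs with _ | ⟨a, t⟩
  · rfl
  · simp only [PySem.List.slice?, PySem.List.sliceIndices]
    norm_num
    rw [List.filterMap_congr (g := fun j => (a :: t)[1 + 2 * j]?) (by intro j _; show (a :: t)[((1 : Int) + 2 * (j : Int)).toNat]? = (a :: t)[1 + 2 * j]?; congr 1)]
    rw [pv_fm (a :: t) (fun j => 1 + 2 * j) _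
      (by intro j hj; show 1 + 2 * j < (a :: t).length; simp only [List.length_cons]; split at hj <;> omega)]
    apply List.ext_getElem?
    intro k
    rw [pvEvens_getElem?]
    by_cases hk : k < if 0 < t.length then (((t.length : Int) + 2 - 1) / 2).toNat else 0
    · have hlt2 : 2 * k < t.length := by split at hk <;> omega
      have hlt : 2 * k + 1 < (a :: t).length := by simp only [List.length_cons]; omega
      have hidx : 1 + 2 * k = 2 * k + 1 := by omega
      rw [List.getElem?_map, List.getElem?_range hk]
      simp only [Option.map_some, hidx]
      rw [List.getD_eq_getElem _ _ hlt, List.getElem?_eq_getElem hlt2, List.getElem_cons_succ]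
    · rw [List.getElem?_eq_none (by simpa using hk), List.getElem?_eq_none (by split at hk <;> omega)]

theorem pv_loopA (l : List Int) : ∀ (cnt : Int) (px py : List Int), cnt % 2 = 0 →
    l.foldl pvStepA (cnt, px, py) =
      (cnt + l.length, px ++ pvEvens l, py ++ pvEvens l.tail) := by
  induction l using pvEvens.induct with
  | case1 => intro cnt px py _; simp [pvEvens]
  | case2 x =>
    intro cnt px py h
    simp [pvStepA, pvEvens, h]
  | case3 x y t ih =>
    intro cnt px py h
    have h1 : ¬ (((cnt + 1) % 2 == 0) = true) := by simp; omega
    have e1 : pvStepA (cnt, px, py) x = (cnt + 1, px ++ [x], py) := by simp [pvStepA, h]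
    have e2 : pvStepA (cnt + 1, px ++ [x], py) y = (cnt + 1 + 1, px ++ [x], py ++ [y]) := by
      simp only [pvStepA]; rw [if_neg h1]
    rw [List.foldl_cons, List.foldl_cons, e1, e2, ih (cnt + 1 + 1) _ _ (by omega)]
    simp [pvEvens, pvEvens_cons]
    omega

-- ===== VERDICT (by name: the statement is the Claim_ definition above) =====
theorem obtainXListAndYList_spec : Claim_equal_obtainXListAndYList := by
  intro Figures _
  unfold Spec_obtainXListAndYList obtainXListAndYList obtainXListAndYList_alt
  have hflat : Figures.foldl (fun st figure => figure.foldl pvStepA st)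
      ((0 : Int), ([] : List Int), ([] : List Int)) =
      (Figures.flatMap (fun figure => figure)).foldl pvStepA ((0 : Int), ([] : List Int), ([] : List Int)) :=
    List.foldl_flatMap.symm
  simp only [hflat, pv_slice_two, pv_slice_two_one]
  rw [pv_loopA _ 0 [] [] (by decide)]
  simp
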